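-- pv_equiv track=rewrite | github.com/mjtrotter/sat-test-bank | src/services/skill_tagger.py | estimate_level
-- ===== SOURCE A (Python) =====
-- LEVEL_RULES: list[tuple[dict, int]] = [
--     # GSM8K → L1 arithmetic
--     ({"contest_family": "gsm8k"}, 1),
--     # MATHCOUNTS chapter
--     ({"contest_family": "mathcounts", "contest_level": "chapter"}, 1),
--     # MATHCOUNTS state
--     ({"contest_family": "mathcounts", "contest_level": "state"}, 2),
--     # MATHCOUNTS national
--     ({"contest_family": "mathcounts", "contest_level": "national"}, 3),
--     # AMC 8
--     ({"contest_family": "amc8"}, 1),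
--     # AMC 10 — problem number determines difficulty
--     ({"contest_family": "amc10"}, 2),
--     # AMC 12
--     ({"contest_family": "amc12"}, 3),
--     # AIME
--     ({"contest_family": "amc_aime"}, 4),
--     # Orca math → L1 word problems
--     ({"contest_family": "orca_math"}, 1),
--     # SAT → L1-L2
--     ({"contest_family": "sat"}, 1),
--     # Generic math competition
--     ({"contest_family": "math_competition"}, 2),
-- ]
--
-- AMC_NUMBER_BUMPS = {
--     "amc8": [(1, 15, 0), (16, 20, 1), (21, 25, 1)],
--     "amc10": [(1, 10, 0), (11, 20, 1), (21, 25, 2)],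
--     "amc12": [(1, 10, 0), (11, 20, 1), (21, 25, 2)],
--     "amc_aime": [(1, 5, 0), (6, 10, 1), (11, 15, 1)],
-- }
--
-- def estimate_level(
--     contest_family: str | None,
--     contest_level: str | None,
--     problem_number: int | None,
-- ) -> int:
--     """Estimate difficulty level (1-5) from contest metadata."""
--     base_level = 2  # default
--
--     for rule_match, level in LEVEL_RULES:
--         match = True
--         for k, v in rule_match.items():
--             if k == "contest_family" and contest_family != v:
--                 match = False
--             elif k == "contest_level" and contest_level != v:
--                 match = False
--         if match:
--             base_level = level
--             break
--
--     # Apply problem number bump for AMC-style contests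
--     if contest_family in AMC_NUMBER_BUMPS and problem_number:
--         for lo, hi, bump in AMC_NUMBER_BUMPS[contest_family]:
--             if lo <= problem_number <= hi:
--                 base_level += bump
--                 break
--
--     return max(1, min(base_level, 5))
-- ===== SOURCE B (Python) =====
-- def estimate_level(contest_family, contest_level, problem_number):
--     """Estimate difficulty level (1-5) from contest metadata."""
--     if contest_family == "gsm8k":
--         base = 1
--     elif contest_family == "mathcounts":
--         if contest_level == "chapter":
--             base = 1
--         elif contest_level == "national":
--             base = 3
--         else:  # "state" or anything unrecognized -> 2
--             base = 2
--     elif contest_family == "amc8":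
--         base = 1
--         if problem_number and 16 <= problem_number <= 25:
--             base += 1
--     elif contest_family == "amc10":
--         base = 2
--         if problem_number:
--             if 11 <= problem_number <= 20:
--                 base += 1
--             elif 21 <= problem_number <= 25:
--                 base += 2
--     elif contest_family == "amc12":
--         base = 3
--         if problem_number:
--             if 11 <= problem_number <= 20:
--                 base += 1
--             elif 21 <= problem_number <= 25:
--                 base += 2
--     elif contest_family == "amc_aime":
--         base = 4
--         if problem_number and 6 <= problem_number <= 15:
--             base += 1
--     elif contest_family in ("orca_math", "sat"):
--         base = 1
--     else:  # "math_competition" or unknown family -> 2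
--         base = 2
--     return max(1, min(base, 5))
-- ===== Notes on version B (the rewrite author's own statement) =====
-- stated objective: simpler
-- what changed: Replaced the LEVEL_RULES dict-scan loop and the AMC_NUMBER_BUMPS table iteration with one direct if/elif chain on contest_family (nested on contest_level / problem_number ranges, with adjacent equal-bump ranges merged), keeping the 0/None falsiness guard and the final clamp.
import Mathlib
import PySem

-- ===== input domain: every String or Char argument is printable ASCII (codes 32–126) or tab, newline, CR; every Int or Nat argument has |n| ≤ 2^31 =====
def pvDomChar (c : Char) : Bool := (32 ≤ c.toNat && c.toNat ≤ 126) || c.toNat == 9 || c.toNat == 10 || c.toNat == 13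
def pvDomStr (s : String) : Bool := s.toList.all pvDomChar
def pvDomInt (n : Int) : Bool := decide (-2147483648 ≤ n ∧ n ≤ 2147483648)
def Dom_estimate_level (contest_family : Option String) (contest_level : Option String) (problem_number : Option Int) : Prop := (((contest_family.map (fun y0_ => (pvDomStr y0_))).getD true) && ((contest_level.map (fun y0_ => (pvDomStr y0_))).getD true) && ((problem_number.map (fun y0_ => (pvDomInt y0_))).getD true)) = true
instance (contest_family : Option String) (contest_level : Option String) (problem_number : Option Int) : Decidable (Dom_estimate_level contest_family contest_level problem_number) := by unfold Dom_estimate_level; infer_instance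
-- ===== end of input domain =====

-- B replaces the LEVEL_RULES table scan and AMC_NUMBER_BUMPS lookup with one direct
-- if/elif chain on contest_family (nested on contest_level / problem_number): simpler.


-- ===== PORT A =====
-- rule dicts: association lists of (key, value) string pairs
def levelRules : List (List (String × String) × Int) :=
  [ ([("contest_family", "gsm8k")], 1),
    ([("contest_family", "mathcounts"), ("contest_level", "chapter")], 1),
    ([("contest_family", "mathcounts"), ("contest_level", "state")], 2),
    ([("contest_family", "mathcounts"), ("contest_level", "national")], 3),
    ([("contest_family", "amc8")], 1),
    ([("contest_family", "amc10")], 2),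
    ([("contest_family", "amc12")], 3),
    ([("contest_family", "amc_aime")], 4),
    ([("contest_family", "orca_math")], 1),
    ([("contest_family", "sat")], 1),
    ([("contest_family", "math_competition")], 2) ]

def amcNumberBumps : List (String × List (Int × Int × Int)) :=
  [ ("amc8", [(1, 15, 0), (16, 20, 1), (21, 25, 1)]),
    ("amc10", [(1, 10, 0), (11, 20, 1), (21, 25, 2)]),
    ("amc12", [(1, 10, 0), (11, 20, 1), (21, 25, 2)]),
    ("amc_aime", [(1, 5, 0), (6, 10, 1), (11, 15, 1)]) ]

-- the inner 'for k, v in rule_match.items()' loop computing 'match'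
def ruleMatchLoop (contest_family : Option String) (contest_level : Option String)
    (items : List (String × String)) : Bool :=
  items.foldl (fun m kv =>
    if kv.1 = "contest_family" ∧ contest_family ≠ some kv.2 then false
    else if kv.1 = "contest_level" ∧ contest_level ≠ some kv.2 then false
    else m) true

-- the outer 'for rule_match, level in LEVEL_RULES' loop with break; falls through to default 2
def rulesScan (contest_family : Option String) (contest_level : Option String) :
    List (List (String × String) × Int) → Int
  | [] => 2
  | (rm, lvl) :: rest =>
      if ruleMatchLoop contest_family contest_level rm then lvl
      else rulesScan contest_family contest_level rest

-- 'for lo, hi, bump in AMC_NUMBER_BUMPS[cf]' with break; 0 if no range matches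
def bumpScan (n : Int) : List (Int × Int × Int) → Int
  | [] => 0
  | (lo, hi, bump) :: rest => if lo ≤ n ∧ n ≤ hi then bump else bumpScan n rest

def estimate_level (contest_family : Option String) (contest_level : Option String) (problem_number : Option Int) : Int :=
  let base := rulesScan contest_family contest_level levelRules
  -- 'if contest_family in AMC_NUMBER_BUMPS and problem_number:' (None/0 are falsy)
  let base :=
    match contest_family, problem_number with
    | some cf, some n =>
        if n ≠ 0 then
          match (amcNumberBumps.find? (fun kv => cf = kv.1)) with
          | some kv => base + bumpScan n kv.2
          | none => base
        else base
    | _, _ => base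
  max 1 (min base 5)

-- ===== PORT B =====
def estimate_level_alt (contest_family : Option String) (contest_level : Option String) (problem_number : Option Int) : Int :=
  let base : Int :=
    if contest_family = some "gsm8k" then 1
    else if contest_family = some "mathcounts" then
      if contest_level = some "chapter" then 1
      else if contest_level = some "national" then 3
      else 2
    else if contest_family = some "amc8" then
      match problem_number with
      | some n => if n ≠ 0 ∧ 16 ≤ n ∧ n ≤ 25 then 2 else 1
      | none => 1
    else if contest_family = some "amc10" then
      match problem_number with
      | some n =>
          if n ≠ 0 then
            if 11 ≤ n ∧ n ≤ 20 then 3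
            else if 21 ≤ n ∧ n ≤ 25 then 4
            else 2
          else 2
      | none => 2
    else if contest_family = some "amc12" then
      match problem_number with
      | some n =>
          if n ≠ 0 then
            if 11 ≤ n ∧ n ≤ 20 then 4
            else if 21 ≤ n ∧ n ≤ 25 then 5
            else 3
          else 3
      | none => 3
    else if contest_family = some "amc_aime" then
      match problem_number with
      | some n => if n ≠ 0 ∧ 6 ≤ n ∧ n ≤ 15 then 5 else 4
      | none => 4
    else if contest_family = some "orca_math" ∨ contest_family = some "sat" then 1
    else 2
  max 1 (min base 5)

-- ===== PRECONDITION & SPEC =====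
def Spec_estimate_level (contest_family : Option String) (contest_level : Option String) (problem_number : Option Int) (out : Int) : Prop := out = estimate_level_alt contest_family contest_level problem_number
instance (contest_family : Option String) (contest_level : Option String) (problem_number : Option Int) (out : Int) : Decidable (Spec_estimate_level contest_family contest_level problem_number out) := by unfold Spec_estimate_level; infer_instance

-- ===== CLAIM (what is proved, stated in full; the proofs are below) =====
def Claim_equal_estimate_level : Prop := ∀ (contest_family : Option String) (contest_level : Option String) (problem_number : Option Int), Dom_estimate_level contest_family contest_level problem_number → Spec_estimate_level contest_family contest_level problem_number (estimate_level contest_family contest_level problem_number)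

-- ===== LEMMAS AND PROOFS =====

-- ===== VERDICT (by name: the statement is the Claim_ definition above) =====
set_option maxHeartbeats 4000000 in
theorem estimate_level_spec : Claim_equal_estimate_level := by
  intro cf cl pn _
  unfold Spec_estimate_level estimate_level estimate_level_alt
  simp only [levelRules, amcNumberBumps, rulesScan, ruleMatchLoop,
    List.foldl, List.find?, ite_self]
  cases cf with
  | none => cases pn <;> simp
  | some s =>
    cases pn with
    | none => simp <;> split_ifs <;> simp_all
    | some n => simp <;> split_ifs <;> simp_all [bumpScan] <;> omega
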